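-- pv_equiv track=rewrite | github.com/sachinagada/CS-112---Fundamentals-of-Programming-and-Computer-Science | HW 8/HW8b.py | hasZero
-- ===== SOURCE A (Python) =====
-- def hasZero(n): #won't work for 0 but guesses start at 1
--     if n<10: #everything less than 10 and greater than 0 doesn't have a 0
--         return False
--     else:
--         right = n%10 # the right most digit
--         left = n//10 # rest of the number
--         if right ==0:
--             return True
--         else:
--             return hasZero(left) #checks the rest of the number for 0s
-- ===== SOURCE B (Python) =====
-- def hasZero(n):
--     # Collect the low digits (all but the leftmost) into a list, then test membership.
--     digits = []
--     while n >= 10: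
--         digits.append(n % 10)
--         n //= 10
--     return 0 in digits
-- ===== Notes on version B (the rewrite author's own statement) =====
-- stated objective: alternative
-- what changed: Replaces the early-return tail recursion with an explicit while-loop that first collects the peeled digits into a list and then answers by a membership test.
import Mathlib
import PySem

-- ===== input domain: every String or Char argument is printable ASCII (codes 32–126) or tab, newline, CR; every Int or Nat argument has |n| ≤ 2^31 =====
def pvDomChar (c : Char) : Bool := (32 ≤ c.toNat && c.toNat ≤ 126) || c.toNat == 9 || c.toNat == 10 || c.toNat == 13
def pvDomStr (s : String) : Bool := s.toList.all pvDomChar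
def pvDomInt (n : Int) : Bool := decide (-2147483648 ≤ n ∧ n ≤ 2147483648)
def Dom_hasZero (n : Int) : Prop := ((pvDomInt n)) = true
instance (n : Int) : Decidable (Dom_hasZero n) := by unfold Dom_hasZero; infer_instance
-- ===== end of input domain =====

-- B replaces A's early-return tail recursion by a loop that collects the peeled digits
-- into a list and then tests membership (objective: alternative decomposition).


-- termination helper for both ports (n ≥ 10 → n // 10 strictly smaller)
theorem pvFloordivTen_lt (n : Int) (h : ¬ n < 10) :
    (PySem.Int.floordiv n 10).toNat < n.toNat := by
  rw [PySem.Int.floordiv_eq_ediv_of_pos (by omega)]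
  omega

-- ===== PORT A =====
def hasZero (n : Int) : Bool :=
  if h : n < 10 then false
  else
    let right := PySem.Int.mod n 10
    let left := PySem.Int.floordiv n 10
    if right == 0 then true
    else hasZero left
termination_by n.toNat
decreasing_by exact pvFloordivTen_lt n h

-- ===== PORT B =====
-- the while loop: peel low digits into an accumulating list (appended at the end, as list.append does)
def hasZeroLoop (n : Int) (digits : List Int) : List Int :=
  if h : n ≥ 10 then
    hasZeroLoop (PySem.Int.floordiv n 10) (digits ++ [PySem.Int.mod n 10])
  else digits
termination_by n.toNat
decreasing_by exact pvFloordivTen_lt n (by omega)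

def hasZero_alt (n : Int) : Bool := (hasZeroLoop n []).contains 0

-- ===== PRECONDITION & SPEC =====
def Spec_hasZero (n : Int) (out : Bool) : Prop := out = hasZero_alt n
instance (n : Int) (out : Bool) : Decidable (Spec_hasZero n out) := by unfold Spec_hasZero; infer_instance

-- ===== CLAIM (what is proved, stated in full; the proofs are below) =====
def Claim_equal_hasZero : Prop := ∀ (n : Int), Dom_hasZero n → Spec_hasZero n (hasZero n)

-- ===== LEMMAS AND PROOFS =====

theorem hasZeroLoop_acc_aux : ∀ (m : Nat) (n : Int), n.toNat ≤ m →
    ∀ acc : List Int, hasZeroLoop n acc = acc ++ hasZeroLoop n [] := by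
  intro m
  induction m with
  | zero =>
      intro n hn acc
      rw [hasZeroLoop, dif_neg (show ¬ n ≥ 10 by omega)]
      conv_rhs => rw [hasZeroLoop, dif_neg (show ¬ n ≥ 10 by omega)]
      simp
  | succ m ih =>
      intro n hn acc
      by_cases h : n ≥ 10
      · have hlt := pvFloordivTen_lt n (by omega)
        rw [hasZeroLoop, dif_pos h]
        conv_rhs => rw [hasZeroLoop, dif_pos h]
        rw [ih _ (by omega) (acc ++ [PySem.Int.mod n 10]),
          ih _ (by omega) ([] ++ [PySem.Int.mod n 10])]
        simp
      · rw [hasZeroLoop, dif_neg h]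
        conv_rhs => rw [hasZeroLoop, dif_neg h]
        simp

theorem hasZero_eq_alt_aux : ∀ (m : Nat) (n : Int), n.toNat ≤ m →
    hasZero n = hasZero_alt n := by
  intro m
  induction m with
  | zero =>
      intro n hn
      rw [hasZero, dif_pos (by omega)]
      unfold hasZero_alt
      rw [hasZeroLoop, dif_neg (by omega)]
      simp
  | succ m ih =>
      intro n hn
      by_cases h : n < 10
      · rw [hasZero, dif_pos h]
        unfold hasZero_alt
        rw [hasZeroLoop, dif_neg (by omega)]
        simp
      · have hlt := pvFloordivTen_lt n h
        rw [hasZero, dif_neg h]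
        show (if PySem.Int.mod n 10 == 0 then true
              else hasZero (PySem.Int.floordiv n 10)) = hasZero_alt n
        unfold hasZero_alt
        conv_rhs => rw [hasZeroLoop, dif_pos (by omega),
          hasZeroLoop_acc_aux m (PySem.Int.floordiv n 10) (by omega)]
        rw [PySem.Int.mod_eq_emod_of_pos (b := 10) (by norm_num),
          PySem.Int.floordiv_eq_ediv_of_pos (b := 10) (by norm_num)]
        by_cases hz : n % 10 = 0
        · simp [hz]
        · rw [if_neg (by simpa using hz)]
          rw [ih _ (by omega)]
          unfold hasZero_alt
          simp
          intro hc
          exact absurd hc.symm hz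

-- ===== VERDICT (by name: the statement is the Claim_ definition above) =====
theorem hasZero_spec : Claim_equal_hasZero := by
  intro n _
  unfold Spec_hasZero
  exact hasZero_eq_alt_aux n.toNat n le_rfl
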